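-- pv_equiv track=rewrite | github.com/releng-tool/releng-tool | releng_tool/util/io.py | interpret_stem_extension
-- ===== SOURCE A (Python) =====
-- MULTIPART_EXTENSIONS = [
--     'tar.bz',
--     'tar.bz2',
--     'tar.gz',
--     'tar.lzma',
--     'tar.xz',
--     'tar.z',
-- ]
--
-- def interpret_stem_extension(basename):
--     """
--     interpret the stem and extension from a provided basename
--
--     Attempts to return the stem value and the an assumed "complete" extension
--     value from a provided ``basename``. While a file extension is more
--     "commonly" the last dot part of a path's base name, this does not apply to
--     resources where they may have multiple extension parts (e.g. my-file.tar.gz)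
--     or have no extension (my-file).
--
--     Examples for some basenames are as follows:
--
--      - my-file.txt -> (my-file, txt)
--      - my-file.tar.gz -> (my-file, tar.gz)
--      - my.file.name.dat -> (my.file.name, dat)
--      - my-file -> (my-file, None)
--      - None -> (None, None)
--
--     Args:
--         basename: the basename to interpret
--
--     Returns:
--         a 2-tuple (stem, extension)
--     """
--     if not basename:
--         return (None, None)
--
--     if '.' not in basename:
--         return (basename, None)
--
--     stem, ext = basename.split('.', 1)
--     while '.' in ext:
--         if ext.lower() in MULTIPART_EXTENSIONS:
--             break
--
--         part, ext = ext.split('.', 1)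
--         stem = '{}.{}'.format(stem, part)
--
--     return (stem, ext)
-- ===== SOURCE B (Python) =====
-- MULTIPART_EXTENSIONS = [
--     'tar.bz',
--     'tar.bz2',
--     'tar.gz',
--     'tar.lzma',
--     'tar.xz',
--     'tar.z',
-- ]
--
-- def interpret_stem_extension(basename):
--     if not basename:
--         return (None, None)
--     parts = basename.split('.')
--     if len(parts) == 1:
--         return (basename, None)
--     if len(parts) >= 3 and '.'.join(parts[-2:]).lower() in MULTIPART_EXTENSIONS:
--         return ('.'.join(parts[:-2]), '.'.join(parts[-2:]))
--     return ('.'.join(parts[:-1]), parts[-1])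
-- ===== Notes on version B (the rewrite author's own statement) =====
-- stated objective: simpler
-- what changed: Replaces the iterative peel-one-part-and-rebuild-stem loop with a single tokenisation: split the basename on '.' once, then decide by an O(1) check whether the lowered join of the last two parts is a known multipart extension.
import Mathlib
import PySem

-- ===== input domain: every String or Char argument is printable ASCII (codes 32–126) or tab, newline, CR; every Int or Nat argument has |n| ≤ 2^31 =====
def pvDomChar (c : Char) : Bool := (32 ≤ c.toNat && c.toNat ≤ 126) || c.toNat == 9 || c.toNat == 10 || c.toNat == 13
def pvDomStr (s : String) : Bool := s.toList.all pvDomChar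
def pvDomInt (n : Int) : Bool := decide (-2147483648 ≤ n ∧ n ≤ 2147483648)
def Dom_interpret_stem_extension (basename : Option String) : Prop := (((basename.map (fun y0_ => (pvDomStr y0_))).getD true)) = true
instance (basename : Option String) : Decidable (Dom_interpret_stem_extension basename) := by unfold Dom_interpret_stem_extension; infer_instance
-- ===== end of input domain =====

-- B replaces A's peel-one-part-and-rebuild-stem while-loop by a single split on '.'
-- followed by one check of the last two components (objective: simpler).

-- ===== PORT A =====
-- module constant MULTIPART_EXTENSIONS
def MULTIPART_EXTENSIONS : List String :=
  ["tar.bz", "tar.bz2", "tar.gz", "tar.lzma", "tar.xz", "tar.z"]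

-- 'x.lower() in MULTIPART_EXTENSIONS' (both sources use this exact test), on the char-list side
def isMultipart (x : List Char) : Bool :=
  (MULTIPART_EXTENSIONS.map String.toList).contains (PySem.Chars.lower x)

-- A's while-loop.  "part, ext = ext.split('.', 1)" is ported by hand (exact: with the
-- one-char separator '.' present in ext, the two pieces are the chars before the first
-- '.' and the chars after it); "stem = '{}.{}'.format(stem, part)" is stem ++ '.' :: part.
def peelLoop (stem ext : List Char) : List Char × List Char :=
  if _h : PySem.Chars.isIn ['.'] ext then
    if isMultipart ext then (stem, ext)
    else
      peelLoop (stem ++ '.' :: ext.takeWhile (· ≠ '.')) ((ext.dropWhile (· ≠ '.')).tail)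
  else (stem, ext)
termination_by ext.length
decreasing_by
  have hmem : '.' ∈ ext := (List.singleton_infix_iff '.' ext).mp ((PySem.Chars.isIn_iff_infix _ _).mp _h)
  have hne : ext.dropWhile (fun c => decide (c ≠ '.')) ≠ [] := by
    intro hnil
    have := List.dropWhile_eq_nil_iff.mp hnil '.' hmem
    simp at this
  have hpos : 0 < (ext.dropWhile (fun c => decide (c ≠ '.'))).length := List.length_pos_iff.mpr hne
  have hle := List.length_dropWhile_le (fun c => decide (c ≠ '.')) ext
  rw [List.length_tail]
  omega

def interpret_stem_extension (basename : Option String) : Option String × Option String :=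
  match basename with
  | none => (none, none)                                   -- 'if not basename' (None)
  | some s =>
    if s.toList = [] then (none, none)                     -- 'if not basename' (empty string)
    else if PySem.Chars.isIn ['.'] s.toList = false then (some s, none)   -- "'.' not in basename"
    else
      -- stem, ext = basename.split('.', 1)   (hand port, exact: '.' is in basename)
      let r := peelLoop (s.toList.takeWhile (· ≠ '.')) ((s.toList.dropWhile (· ≠ '.')).tail)
      (some (String.ofList r.1), some (String.ofList r.2))

-- ===== PORT B =====
def interpret_stem_extension_alt (basename : Option String) : Option String × Option String :=
  match basename with
  | none => (none, none)                                   -- 'if not basename'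
  | some s =>
    if s.toList = [] then (none, none)
    else
      let parts := PySem.Chars.splitOn s.toList ['.']      -- parts = basename.split('.')
      if parts.length = 1 then (some s, none)
      else if 3 ≤ parts.length then
        let tail2 := PySem.Chars.join ['.'] (parts.drop (parts.length - 2))  -- '.'.join(parts[-2:])
        if isMultipart tail2 then
          (some (String.ofList (PySem.Chars.join ['.'] (parts.take (parts.length - 2)))), some (String.ofList tail2))
        else
          (some (String.ofList (PySem.Chars.join ['.'] parts.dropLast)), some (String.ofList (parts.getLastD [])))
      else
        -- '.'.join(parts[:-1]), parts[-1]   (parts is nonempty)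
        (some (String.ofList (PySem.Chars.join ['.'] parts.dropLast)), some (String.ofList (parts.getLastD [])))

-- ===== PRECONDITION & SPEC =====
def Spec_interpret_stem_extension (basename : Option String) (out : Option String × Option String) : Prop := out = interpret_stem_extension_alt basename
instance (basename : Option String) (out : Option String × Option String) : Decidable (Spec_interpret_stem_extension basename out) := by unfold Spec_interpret_stem_extension; infer_instance

-- ===== CLAIM (what is proved, stated in full; the proofs are below) =====
def Claim_equal_interpret_stem_extension : Prop := ∀ (basename : Option String), Dom_interpret_stem_extension basename → Spec_interpret_stem_extension basename (interpret_stem_extension basename)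

-- ===== LEMMAS AND PROOFS =====

-- proof-side model of basename.split('.'):
def splitDots : List Char → List (List Char)
  | [] => [[]]
  | c :: rest =>
    if c = '.' then [] :: splitDots rest
    else
      match splitDots rest with
      | p :: ps => (c :: p) :: ps
      | [] => [[c]]

theorem splitDots_ne_nil (l : List Char) : splitDots l ≠ [] := by
  induction l with
  | nil => simp [splitDots]
  | cons c rest ih =>
    simp only [splitDots]
    split_ifs
    · simp
    · cases h : splitDots rest <;> simp

def consHead (pre : List Char) : List (List Char) → List (List Char)
  | [] => [pre]
  | p :: ps => (pre ++ p) :: ps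

theorem splitOn_go_eq : ∀ (fuel : Nat) (l cur : List Char) (acc : List (List Char)),
    l.length < fuel →
    PySem.Chars.splitOn.go ['.'] fuel l cur acc = acc.reverse ++ consHead cur.reverse (splitDots l) := by
  intro fuel
  induction fuel with
  | zero => intro l cur acc h; omega
  | succ f ih =>
    intro l cur acc h
    cases l with
    | nil => simp [PySem.Chars.splitOn.go, splitDots, consHead]
    | cons c rest =>
      rw [PySem.Chars.splitOn.go]
      by_cases hc : c = '.'
      · subst hc
        rw [if_pos (by simp [List.isPrefixOf])]
        simp only [List.length_singleton, List.drop_succ_cons, List.drop_zero]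
        rw [ih rest [] (cur.reverse :: acc) (by simpa using Nat.lt_of_succ_lt_succ h)]
        simp [splitDots, consHead]
        cases hs : splitDots rest with
        | nil => exact absurd hs (splitDots_ne_nil rest)
        | cons p ps => simp
      · rw [if_neg (by simp [List.isPrefixOf]; exact fun h => hc h.symm)]
        rw [ih rest (c :: cur) acc (by simpa using Nat.lt_of_succ_lt_succ h)]
        simp only [splitDots, if_neg hc]
        cases hs : splitDots rest with
        | nil => exact absurd hs (splitDots_ne_nil rest)
        | cons p ps => simp [consHead]

theorem splitOn_eq_splitDots (l : List Char) : PySem.Chars.splitOn l ['.'] = splitDots l := by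
  unfold PySem.Chars.splitOn
  rw [splitOn_go_eq (l.length + 1) l [] [] (Nat.lt_succ_self _)]
  cases hs : splitDots l with
  | nil => exact absurd hs (splitDots_ne_nil l)
  | cons p ps => simp [consHead]

theorem join_splitDots (l : List Char) : PySem.Chars.join ['.'] (splitDots l) = l := by
  induction l with
  | nil => simp [splitDots, PySem.Chars.join_singleton]
  | cons c rest ih =>
    simp only [splitDots]
    by_cases hc : c = '.'
    · subst hc
      rw [if_pos rfl]
      cases hs : splitDots rest with
      | nil => exact absurd hs (splitDots_ne_nil rest)
      | cons p ps =>
        rw [PySem.Chars.join_cons_cons]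
        rw [hs] at ih
        simp [ih]
    · rw [if_neg hc]
      cases hs : splitDots rest with
      | nil => exact absurd hs (splitDots_ne_nil rest)
      | cons p ps =>
        rw [hs] at ih
        cases ps with
        | nil => simp_all [PySem.Chars.join_singleton]
        | cons q qs =>
          rw [PySem.Chars.join_cons_cons] at ih ⊢
          simp [← ih]

theorem splitDots_dotfree (l : List Char) : ∀ p ∈ splitDots l, '.' ∉ p := by
  induction l with
  | nil => simp [splitDots]
  | cons c rest ih =>
    simp only [splitDots]
    by_cases hc : c = '.'
    · subst hc; rw [if_pos rfl]
      intro p hp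
      rcases List.mem_cons.mp hp with h | h
      · subst h; simp
      · exact ih p h
    · rw [if_neg hc]
      cases hs : splitDots rest with
      | nil => exact absurd hs (splitDots_ne_nil rest)
      | cons q qs =>
        rw [hs] at ih
        intro p hp
        rcases List.mem_cons.mp hp with h | h
        · subst h
          intro hmem
          rcases List.mem_cons.mp hmem with h' | h'
          · exact hc h'.symm
          · exact ih q (List.mem_cons_self) h'
        · exact ih p (List.mem_cons_of_mem _ h)

theorem length_splitDots_eq_one_iff (l : List Char) : (splitDots l).length = 1 ↔ '.' ∉ l := by
  induction l with
  | nil => simp [splitDots]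
  | cons c rest ih =>
    simp only [splitDots]
    by_cases hc : c = '.'
    · subst hc
      rw [if_pos rfl]
      constructor
      · intro h; exact absurd (List.length_eq_zero_iff.mp (by simpa using h)) (splitDots_ne_nil rest)
      · intro h; exact absurd (List.mem_cons_self) h
    · rw [if_neg hc]
      cases hs : splitDots rest with
      | nil => exact absurd hs (splitDots_ne_nil rest)
      | cons q qs =>
        rw [hs] at ih
        simp only [List.length_cons] at ih ⊢
        constructor
        · intro h hmem
          rcases List.mem_cons.mp hmem with h' | h'
          · exact hc h'.symm
          · exact (ih.mp h) h'
        · intro h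
          exact ih.mpr (fun hm => h (List.mem_cons_of_mem _ hm))

theorem splitDots_cons_dot (l : List Char) (h : '.' ∈ l) :
    splitDots l = l.takeWhile (· ≠ '.') :: splitDots ((l.dropWhile (· ≠ '.')).tail) := by
  induction l with
  | nil => simp at h
  | cons c rest ih =>
    by_cases hc : c = '.'
    · subst hc
      simp [splitDots, List.takeWhile, List.dropWhile]
    · have hr : '.' ∈ rest := by
        rcases List.mem_cons.mp h with h' | h'
        · exact absurd h'.symm hc
        · exact h'
      simp only [splitDots, if_neg hc]
      rw [ih hr]
      simp [List.takeWhile, List.dropWhile, hc]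

-- lowering a character yields '.' exactly for '.'
theorem lowerChar_eq_dot_iff (c : Char) : (PySem.Chars.lowerChar c = '.') ↔ c = '.' := by
  unfold PySem.Chars.lowerChar PySem.Chars.isupper
  split_ifs with h
  · simp only [Bool.and_eq_true, decide_eq_true_eq, Char.le_def, UInt32.le_iff_toNat_le] at h
    have h65 : ('A' : Char).val.toNat = 65 := by decide
    have h90 : ('Z' : Char).val.toNat = 90 := by decide
    constructor
    · intro hc
      have h1 : (Char.ofNat (c.toNat + 32)).toNat = ('.' : Char).toNat := by rw [hc]
      rw [Char.toNat_ofNat] at h1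
      have hv : (c.toNat + 32).isValidChar := Or.inl (by unfold Char.toNat at *; omega)
      rw [if_pos hv] at h1
      have : ('.' : Char).toNat = 46 := by decide
      unfold Char.toNat at *
      omega
    · intro hc; subst hc
      exfalso
      have : ('.' : Char).val.toNat = 46 := by decide
      omega
  · exact Iff.rfl

theorem count_dot_lower (l : List Char) : (PySem.Chars.lower l).count '.' = l.count '.' := by
  unfold PySem.Chars.lower
  induction l with
  | nil => simp
  | cons c rest ih =>
    simp only [List.map_cons, List.count_cons, ih]
    by_cases hc : c = '.'
    · subst hc; simp [lowerChar_eq_dot_iff]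
    · simp [hc, (lowerChar_eq_dot_iff c).not.mpr hc]

theorem isMultipart_count (x : List Char) (h : isMultipart x = true) : x.count '.' = 1 := by
  unfold isMultipart at h
  rw [List.contains_iff_mem] at h
  have hcnt : ∀ m ∈ MULTIPART_EXTENSIONS.map String.toList, m.count '.' = 1 := by decide
  have := hcnt _ h
  rw [count_dot_lower] at this
  exact this

theorem count_dot_join (ps : List (List Char)) (hps : ps ≠ []) (hdf : ∀ p ∈ ps, '.' ∉ p) :
    (PySem.Chars.join ['.'] ps).count '.' = ps.length - 1 := by
  induction ps with
  | nil => simp at hps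
  | cons q qs ih =>
    cases qs with
    | nil =>
      rw [PySem.Chars.join_singleton]
      simp [List.count_eq_zero.mpr (hdf q List.mem_cons_self)]
    | cons r rs =>
      rw [PySem.Chars.join_cons_cons]
      have hq : '.' ∉ q := hdf q List.mem_cons_self
      have := ih (by simp) (fun p hp => hdf p (List.mem_cons_of_mem _ hp))
      simp only [List.count_append, List.count_eq_zero.mpr hq, List.count_singleton] at *
      simp [this]
      omega

theorem isIn_join (ps : List (List Char)) (hps : ps ≠ []) (hdf : ∀ p ∈ ps, '.' ∉ p) :
    PySem.Chars.isIn ['.'] (PySem.Chars.join ['.'] ps) = true ↔ 2 ≤ ps.length := by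
  rw [PySem.Chars.isIn_iff_infix, List.singleton_infix_iff, ← List.count_pos_iff,
    count_dot_join ps hps hdf]
  cases ps with
  | nil => simp at hps
  | cons q qs => cases qs <;> simp

theorem join_append_dot (a b : List Char) (X : List (List Char)) :
    PySem.Chars.join ['.'] ((a ++ '.' :: b) :: X) = PySem.Chars.join ['.'] (a :: b :: X) := by
  cases X with
  | nil => rw [PySem.Chars.join_singleton, PySem.Chars.join_cons_cons, PySem.Chars.join_singleton]; simp
  | cons y ys =>
    rw [PySem.Chars.join_cons_cons, PySem.Chars.join_cons_cons, PySem.Chars.join_cons_cons]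
    simp

theorem takeWhile_dotfree_append (q rest : List Char) (hq : '.' ∉ q) :
    (q ++ '.' :: rest).takeWhile (· ≠ '.') = q ∧ (q ++ '.' :: rest).dropWhile (· ≠ '.') = '.' :: rest := by
  induction q with
  | nil => simp
  | cons c cs ih =>
    have hc : c ≠ '.' := fun h => hq (h ▸ List.mem_cons_self)
    have h2 := ih (fun h => hq (List.mem_cons_of_mem _ h))
    simp only [List.cons_append, List.takeWhile_cons, List.dropWhile_cons]
    simp only [h2.1, h2.2] at *
    simp [hc]

theorem peelLoop_spec : ∀ (ps : List (List Char)) (stem : List Char), ps ≠ [] →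
    (∀ p ∈ ps, '.' ∉ p) →
    peelLoop stem (PySem.Chars.join ['.'] ps) =
      if 2 ≤ ps.length ∧ isMultipart (PySem.Chars.join ['.'] (ps.drop (ps.length - 2))) = true then
        (PySem.Chars.join ['.'] (stem :: ps.take (ps.length - 2)),
         PySem.Chars.join ['.'] (ps.drop (ps.length - 2)))
      else
        (PySem.Chars.join ['.'] (stem :: ps.dropLast), ps.getLastD []) := by
  intro ps
  induction ps with
  | nil => intro stem h; simp at h
  | cons q qs ih =>
    intro stem _ hdf
    cases qs with
    | nil =>
      rw [PySem.Chars.join_singleton, peelLoop]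
      have hni : PySem.Chars.isIn ['.'] q = false := by
        rw [← Bool.not_eq_true, PySem.Chars.isIn_iff_infix, List.singleton_infix_iff]
        exact hdf q List.mem_cons_self
      rw [dif_neg (by simp [hni])]
      rw [if_neg (by simp)]
      simp [PySem.Chars.join_singleton]
    | cons r rs =>
      have hdf' : ∀ p ∈ r :: rs, '.' ∉ p := fun p hp => hdf p (List.mem_cons_of_mem _ hp)
      have hq : '.' ∉ q := hdf q List.mem_cons_self
      have hii : PySem.Chars.isIn ['.'] (PySem.Chars.join ['.'] (q :: r :: rs)) = true :=
        (isIn_join _ (by simp) hdf).mpr (by simp)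
      rw [peelLoop, dif_pos hii]
      by_cases hm : isMultipart (PySem.Chars.join ['.'] (q :: r :: rs)) = true
      · -- break: multipart matched, so exactly two parts
        have h1 : (PySem.Chars.join ['.'] (q :: r :: rs)).count '.' = 1 := isMultipart_count _ hm
        rw [count_dot_join _ (by simp) hdf] at h1
        simp only [List.length_cons] at h1
        have hrs : rs = [] := List.length_eq_zero_iff.mp (by omega)
        subst hrs
        rw [if_pos hm]
        rw [if_pos ⟨by simp, by rw [show List.drop (([q, r] : List (List Char)).length - 2) [q, r] = [q, r] from rfl]; exact hm⟩]
        rw [show List.drop (([q, r] : List (List Char)).length - 2) [q, r] = [q, r] from rfl,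
            show List.take (([q, r] : List (List Char)).length - 2) [q, r] = [] from rfl]
        simp [PySem.Chars.join_singleton]
      · rw [if_neg hm]
        have hjoin : PySem.Chars.join ['.'] (q :: r :: rs) = q ++ '.' :: PySem.Chars.join ['.'] (r :: rs) := by
          rw [PySem.Chars.join_cons_cons]; simp
        have htw := takeWhile_dotfree_append q (PySem.Chars.join ['.'] (r :: rs)) hq
        rw [hjoin, htw.1, htw.2]
        simp only [List.tail_cons]
        rw [ih (stem ++ '.' :: q) (by simp) hdf']
        cases rs with
        | nil =>
          rw [if_neg (by simp)]
          rw [if_neg (by rw [show List.drop (([q, r] : List (List Char)).length - 2) [q, r] = [q, r] from rfl]; exact fun h => hm h.2)]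
          simp [PySem.Chars.join_singleton, PySem.Chars.join_cons_cons, List.getLastD]
        | cons t ts =>
          have hlen : (q :: r :: t :: ts).length - 2 = ((r :: t :: ts).length - 2) + 1 := by simp
          have hdrop : (q :: r :: t :: ts).drop ((q :: r :: t :: ts).length - 2) =
              (r :: t :: ts).drop ((r :: t :: ts).length - 2) := by rw [hlen, List.drop_succ_cons]
          have htake : (q :: r :: t :: ts).take ((q :: r :: t :: ts).length - 2) =
              q :: (r :: t :: ts).take ((r :: t :: ts).length - 2) := by rw [hlen, List.take_succ_cons]
          by_cases hm2 : isMultipart (PySem.Chars.join ['.'] ((r :: t :: ts).drop ((r :: t :: ts).length - 2))) = true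
          · rw [if_pos ⟨by simp, hm2⟩]
            rw [if_pos ⟨by simp, by rw [hdrop]; exact hm2⟩]
            rw [hdrop, htake, join_append_dot]
          · rw [if_neg (by rintro ⟨-, h2⟩; exact hm2 h2)]
            rw [if_neg (by rintro ⟨-, h2⟩; rw [hdrop] at h2; exact hm2 h2)]
            have hdl : (q :: r :: t :: ts).dropLast = q :: (r :: t :: ts).dropLast := by simp
            rw [hdl, join_append_dot]
            simp [List.getLastD]

-- ===== VERDICT (by name: the statement is the Claim_ definition above) =====
theorem interpret_stem_extension_spec : Claim_equal_interpret_stem_extension := by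
  intro basename _
  unfold Spec_interpret_stem_extension
  match basename with
  | none => rfl
  | some s =>
    unfold interpret_stem_extension interpret_stem_extension_alt
    simp only
    by_cases hnil : s.toList = []
    · rw [if_pos hnil, if_pos hnil]
    · rw [if_neg hnil, if_neg hnil]
      rw [splitOn_eq_splitDots]
      by_cases hdot : '.' ∈ s.toList
      · have hii : PySem.Chars.isIn ['.'] s.toList = true := by
          rw [PySem.Chars.isIn_iff_infix, List.singleton_infix_iff]; exact hdot
        rw [hii]
        rw [if_neg (by simp)]
        rw [if_neg (by rw [length_splitDots_eq_one_iff]; exact fun h => h hdot)]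
        rw [splitDots_cons_dot s.toList hdot]
        set stem0 := s.toList.takeWhile (· ≠ '.') with hstem0
        set ps := splitDots ((s.toList.dropWhile (· ≠ '.')).tail) with hps
        have hjps : PySem.Chars.join ['.'] ps = (s.toList.dropWhile (· ≠ '.')).tail := join_splitDots _
        have hdfp : ∀ p ∈ stem0 :: ps, '.' ∉ p := by
          rw [← splitDots_cons_dot s.toList hdot]; exact splitDots_dotfree s.toList
        have hdf : ∀ p ∈ ps, '.' ∉ p := fun p hp => hdfp p (List.mem_cons_of_mem _ hp)
        have hpsne : ps ≠ [] := splitDots_ne_nil _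
        rw [← hjps, peelLoop_spec ps stem0 hpsne hdf]
        clear_value stem0 ps
        cases ps with
        | nil => exact absurd rfl hpsne
        | cons e es =>
          cases es with
          | nil =>
            -- one part after the first dot: two parts in all
            rw [if_neg (by simp)]
            rw [if_neg (by simp)]
            simp [PySem.Chars.join_singleton, List.getLastD]
          | cons f fs =>
            rw [show (((e :: f :: fs) : List (List Char)).length - 2) = fs.length from rfl,
                show (((stem0 :: e :: f :: fs) : List (List Char)).length - 2) = fs.length + 1 from rfl,
                List.drop_succ_cons, List.take_succ_cons]
            by_cases hm : isMultipart (PySem.Chars.join ['.'] ((e :: f :: fs).drop fs.length)) = true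
            · rw [if_pos ⟨by simp, hm⟩]
              rw [if_pos (by simp)]
              rw [if_pos hm]
            · rw [if_neg (by rintro ⟨-, h2⟩; exact hm h2)]
              rw [if_pos (by simp)]
              rw [if_neg hm]
              rw [show (stem0 :: e :: f :: fs).dropLast = stem0 :: (e :: f :: fs).dropLast from by simp]
              simp [List.getLastD]
      · have hii : PySem.Chars.isIn ['.'] s.toList = false := by
          rw [← Bool.not_eq_true, PySem.Chars.isIn_iff_infix, List.singleton_infix_iff]; exact hdot
        rw [hii]
        rw [if_pos rfl]
        rw [if_pos (by rw [length_splitDots_eq_one_iff]; exact hdot)]
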